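-- pv_equiv track=rewrite | github.com/lolotobg/FakeNewsChallenge | classic/feature_engineering.py | append_chargrams
-- ===== SOURCE A (Python) =====
-- def chargrams(input, n):
--     output = []
--     for i in range(len(input) - n + 1):
--         output.append(input[i:i + n])
--     return output
--
-- def append_chargrams(features, headline_no_stops, clean_body, clean_body_100, clean_body_255, size):
--     grams = [' '.join(x) for x in chargrams(headline_no_stops, size)]
--     grams_hits = 0
--     grams_early_hits = 0
--     grams_first_hits = 0
--     for gram in grams:
--         if gram in clean_body_100:
--             grams_hits += 1
--             grams_early_hits += 1
--             grams_first_hits += 1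
--         elif gram in clean_body_255:
--             grams_hits += 1
--             grams_early_hits += 1
--         elif gram in clean_body:
--             grams_hits += 1
--
--     features.append(grams_hits)
--     features.append(grams_early_hits)
--     features.append(grams_first_hits)
--     return features
-- ===== SOURCE B (Python) =====
-- def append_chargrams(features, headline_no_stops, clean_body, clean_body_100, clean_body_255, size):
--     # Aggregate equal grams once in a dict, then classify each DISTINCT gram a single time.
--     counts = {}
--     for i in range(len(headline_no_stops) - size + 1):
--         g = ' '.join(headline_no_stops[i:i + size])
--         counts[g] = counts.get(g, 0) + 1
--     hits = early = first = 0
--     for g, c in counts.items():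
--         if g in clean_body_100:
--             hits += c
--             early += c
--             first += c
--         elif g in clean_body_255:
--             hits += c
--             early += c
--         elif g in clean_body:
--             hits += c
--     features.append(hits)
--     features.append(early)
--     features.append(first)
--     return features
-- ===== Notes on version B (the rewrite author's own statement) =====
-- stated objective: alternative
-- what changed: B builds a dict counting each gram's multiplicity in one pass and then runs the three substring membership tests only once per DISTINCT gram (weighting by multiplicity), instead of A's per-gram elif chain that re-scans the bodies for every duplicate gram.
import Mathlib
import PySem

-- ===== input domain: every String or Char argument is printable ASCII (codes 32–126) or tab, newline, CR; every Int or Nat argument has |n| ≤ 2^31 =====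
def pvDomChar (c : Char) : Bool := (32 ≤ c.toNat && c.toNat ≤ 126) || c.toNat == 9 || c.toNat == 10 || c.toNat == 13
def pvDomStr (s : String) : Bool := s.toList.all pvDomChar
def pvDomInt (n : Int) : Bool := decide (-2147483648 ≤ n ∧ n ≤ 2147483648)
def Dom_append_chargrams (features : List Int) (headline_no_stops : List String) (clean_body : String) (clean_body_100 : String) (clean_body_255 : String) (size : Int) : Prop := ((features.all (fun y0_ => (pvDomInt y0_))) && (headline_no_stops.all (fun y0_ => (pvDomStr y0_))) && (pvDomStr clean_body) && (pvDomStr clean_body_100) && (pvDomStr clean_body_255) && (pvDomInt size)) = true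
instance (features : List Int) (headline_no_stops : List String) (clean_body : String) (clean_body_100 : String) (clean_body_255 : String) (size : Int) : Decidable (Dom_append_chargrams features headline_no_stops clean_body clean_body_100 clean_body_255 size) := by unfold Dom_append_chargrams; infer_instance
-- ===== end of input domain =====

-- ===== PORT A =====
-- One honest line: B aggregates duplicate grams in a dict first and classifies each distinct gram once;
-- equivalence is about the RETURN value (Python A mutates `features` in place, Python B does the same).
def chargramsPort (input : List String) (n : Int) : List (List String) :=
  (PySem.List.pyRange 0 ((input.length : Int) - n + 1) 1).foldl
    (fun output i => output ++ [PySem.List.slice input (some i) (some (i + n))]) []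

def append_chargrams (features : List Int) (headline_no_stops : List String) (clean_body : String) (clean_body_100 : String) (clean_body_255 : String) (size : Int) : List Int :=
  let grams := (chargramsPort headline_no_stops size).map (fun x => PySem.Str.join " " x)
  let s := grams.foldl (fun (s : Int × Int × Int) gram =>
      if PySem.Str.isIn gram clean_body_100 then (s.1 + 1, s.2.1 + 1, s.2.2 + 1)
      else if PySem.Str.isIn gram clean_body_255 then (s.1 + 1, s.2.1 + 1, s.2.2)
      else if PySem.Str.isIn gram clean_body then (s.1 + 1, s.2.1, s.2.2)
      else s) (0, 0, 0)
  features ++ [s.1] ++ [s.2.1] ++ [s.2.2]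

-- ===== PORT B =====
def append_chargrams_alt (features : List Int) (headline_no_stops : List String) (clean_body : String) (clean_body_100 : String) (clean_body_255 : String) (size : Int) : List Int :=
  let counts : PySem.Dict String Int :=
    (PySem.List.pyRange 0 ((headline_no_stops.length : Int) - size + 1) 1).foldl
      (fun d i =>
        let g := PySem.Str.join " " (PySem.List.slice headline_no_stops (some i) (some (i + size)))
        d.insert g (d.getD g 0 + 1)) PySem.Dict.empty
  let s := counts.items.foldl (fun (s : Int × Int × Int) gc =>
      if PySem.Str.isIn gc.1 clean_body_100 then (s.1 + gc.2, s.2.1 + gc.2, s.2.2 + gc.2)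
      else if PySem.Str.isIn gc.1 clean_body_255 then (s.1 + gc.2, s.2.1 + gc.2, s.2.2)
      else if PySem.Str.isIn gc.1 clean_body then (s.1 + gc.2, s.2.1, s.2.2)
      else s) (0, 0, 0)
  features ++ [s.1, s.2.1, s.2.2]

-- ===== PRECONDITION & SPEC =====
def Spec_append_chargrams (features : List Int) (headline_no_stops : List String) (clean_body : String) (clean_body_100 : String) (clean_body_255 : String) (size : Int) (out : List Int) : Prop := out = append_chargrams_alt features headline_no_stops clean_body clean_body_100 clean_body_255 size
instance (features : List Int) (headline_no_stops : List String) (clean_body : String) (clean_body_100 : String) (clean_body_255 : String) (size : Int) (out : List Int) : Decidable (Spec_append_chargrams features headline_no_stops clean_body clean_body_100 clean_body_255 size out) := by unfold Spec_append_chargrams; infer_instance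

-- ===== CLAIM (what is proved, stated in full; the proofs are below) =====
def Claim_equal_append_chargrams : Prop := ∀ (features : List Int) (headline_no_stops : List String) (clean_body : String) (clean_body_100 : String) (clean_body_255 : String) (size : Int), Dom_append_chargrams features headline_no_stops clean_body clean_body_100 clean_body_255 size → Spec_append_chargrams features headline_no_stops clean_body clean_body_100 clean_body_255 size (append_chargrams features headline_no_stops clean_body clean_body_100 clean_body_255 size)

-- ===== LEMMAS AND PROOFS =====

/-- Summing `f` over the `p`-part of a list via an `if` is summing over the filtered list. -/
lemma pv_sum_map_if_filter {α : Type} (S : List α) (p : α → Bool) (f : α → Nat) :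
    (S.map fun k => if p k then f k else 0).sum = ((S.filter p).map f).sum := by
  induction S with
  | nil => rfl
  | cons a t ih => by_cases h : p a <;> simp [h, ih]

/-- Crux: the multiplicity-weighted sum over the distinct grams is the plain count. -/
lemma pv_sum_ofList_count_nat (l : List String) (p : String → Bool) :
    ((PySem.Set.ofList l).map fun k => if p k then l.count k else 0).sum = l.countP p := by
  have hperm : (PySem.Set.ofList l).Perm l.dedup :=
    (List.perm_ext_iff_of_nodup (PySem.Set.nodup_ofList l) l.nodup_dedup).2
      (fun a => by simp [PySem.Set.mem_ofList, List.mem_dedup])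
  rw [(hperm.map _).sum_eq, pv_sum_map_if_filter,
    List.sum_map_count_dedup_filter_eq_countP]

/-- The same, with the weighted sum taken over `Int` as in the ports. -/
lemma pv_sum_ofList_count (l : List String) (p : String → Bool) :
    ((PySem.Set.ofList l).map fun k => if p k then (l.count k : Int) else 0).sum
      = (l.countP p : Int) := by
  have h := congrArg (fun n : Nat => (n : Int)) (pv_sum_ofList_count_nat l p)
  simp only [Nat.cast_list_sum, List.map_map] at h
  simpa [Function.comp_def, apply_ite (fun n : Nat => (n : Int))] using h

/-- A's single pass with three `elif`-coupled counters computes the three tier counts. -/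
lemma pv_foldA (l : List String) (cb c100 c255 : String) :
    l.foldl (fun (s : Int × Int × Int) gram =>
        if PySem.Str.isIn gram c100 then (s.1 + 1, s.2.1 + 1, s.2.2 + 1)
        else if PySem.Str.isIn gram c255 then (s.1 + 1, s.2.1 + 1, s.2.2)
        else if PySem.Str.isIn gram cb then (s.1 + 1, s.2.1, s.2.2)
        else s) (0, 0, 0)
      = ((l.countP (fun g => PySem.Str.isIn g c100 || PySem.Str.isIn g c255 || PySem.Str.isIn g cb) : Int),
         (l.countP (fun g => PySem.Str.isIn g c100 || PySem.Str.isIn g c255) : Int),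
         (l.countP (fun g => PySem.Str.isIn g c100) : Int)) := by
  have hstep : (fun (s : Int × Int × Int) gram =>
        if PySem.Str.isIn gram c100 then (s.1 + 1, s.2.1 + 1, s.2.2 + 1)
        else if PySem.Str.isIn gram c255 then (s.1 + 1, s.2.1 + 1, s.2.2)
        else if PySem.Str.isIn gram cb then (s.1 + 1, s.2.1, s.2.2)
        else s)
      = fun (s : Int × Int × Int) g =>
        ((fun (a : Int) g => if (PySem.Str.isIn g c100 || PySem.Str.isIn g c255 || PySem.Str.isIn g cb) = true then a + 1 else a) s.1 g,
         (fun (t : Int × Int) g =>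
           ((fun (a : Int) g => if (PySem.Str.isIn g c100 || PySem.Str.isIn g c255) = true then a + 1 else a) t.1 g,
            (fun (a : Int) g => if (PySem.Str.isIn g c100) = true then a + 1 else a) t.2 g)) s.2 g) := by
    funext s g
    cases h1 : PySem.Chars.isIn g.toList c100.toList <;>
      cases h2 : PySem.Chars.isIn g.toList c255.toList <;>
        cases h3 : PySem.Chars.isIn g.toList cb.toList <;>
          simp [PySem.Str.isIn, h1, h2, h3]
  rw [hstep,
    PySem.List.foldl_prod_mk
      (f := fun (a : Int) g => if (PySem.Str.isIn g c100 || PySem.Str.isIn g c255 || PySem.Str.isIn g cb) = true then a + 1 else a)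
      (g := fun (t : Int × Int) g =>
        ((fun (a : Int) g => if (PySem.Str.isIn g c100 || PySem.Str.isIn g c255) = true then a + 1 else a) t.1 g,
         (fun (a : Int) g => if (PySem.Str.isIn g c100) = true then a + 1 else a) t.2 g)),
    PySem.List.foldl_prod_mk
      (f := fun (a : Int) g => if (PySem.Str.isIn g c100 || PySem.Str.isIn g c255) = true then a + 1 else a)
      (g := fun (a : Int) g => if (PySem.Str.isIn g c100) = true then a + 1 else a),
    PySem.List.foldl_if_add_one, PySem.List.foldl_if_add_one, PySem.List.foldl_if_add_one]
  simp

/-- B's pass over the counter items, weighted by multiplicities, computes the same triple. -/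
lemma pv_foldB (l : List String) (cb c100 c255 : String) :
    (PySem.Dict.counter l).items.foldl (fun (s : Int × Int × Int) gc =>
        if PySem.Str.isIn gc.1 c100 then (s.1 + gc.2, s.2.1 + gc.2, s.2.2 + gc.2)
        else if PySem.Str.isIn gc.1 c255 then (s.1 + gc.2, s.2.1 + gc.2, s.2.2)
        else if PySem.Str.isIn gc.1 cb then (s.1 + gc.2, s.2.1, s.2.2)
        else s) (0, 0, 0)
      = ((l.countP (fun g => PySem.Str.isIn g c100 || PySem.Str.isIn g c255 || PySem.Str.isIn g cb) : Int),
         (l.countP (fun g => PySem.Str.isIn g c100 || PySem.Str.isIn g c255) : Int),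
         (l.countP (fun g => PySem.Str.isIn g c100) : Int)) := by
  rw [PySem.Dict.items_counter, List.foldl_map]
  have hstep : (fun (x : Int × Int × Int) (y : String) =>
        if PySem.Str.isIn (y, (l.count y : Int)).1 c100 then
          (x.1 + (y, (l.count y : Int)).2, x.2.1 + (y, (l.count y : Int)).2, x.2.2 + (y, (l.count y : Int)).2)
        else if PySem.Str.isIn (y, (l.count y : Int)).1 c255 then
          (x.1 + (y, (l.count y : Int)).2, x.2.1 + (y, (l.count y : Int)).2, x.2.2)
        else if PySem.Str.isIn (y, (l.count y : Int)).1 cb then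
          (x.1 + (y, (l.count y : Int)).2, x.2.1, x.2.2)
        else x)
      = fun (s : Int × Int × Int) k =>
        ((fun (a : Int) k => a + (if (PySem.Str.isIn k c100 || PySem.Str.isIn k c255 || PySem.Str.isIn k cb) then (l.count k : Int) else 0)) s.1 k,
         (fun (t : Int × Int) k =>
           ((fun (a : Int) k => a + (if (PySem.Str.isIn k c100 || PySem.Str.isIn k c255) then (l.count k : Int) else 0)) t.1 k,
            (fun (a : Int) k => a + (if (PySem.Str.isIn k c100) then (l.count k : Int) else 0)) t.2 k)) s.2 k) := by
    funext s k
    cases h1 : PySem.Chars.isIn k.toList c100.toList <;>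
      cases h2 : PySem.Chars.isIn k.toList c255.toList <;>
        cases h3 : PySem.Chars.isIn k.toList cb.toList <;>
          simp [PySem.Str.isIn, h1, h2, h3]
  rw [hstep,
    PySem.List.foldl_prod_mk
      (f := fun (a : Int) k => a + (if (PySem.Str.isIn k c100 || PySem.Str.isIn k c255 || PySem.Str.isIn k cb) then (l.count k : Int) else 0))
      (g := fun (t : Int × Int) k =>
        ((fun (a : Int) k => a + (if (PySem.Str.isIn k c100 || PySem.Str.isIn k c255) then (l.count k : Int) else 0)) t.1 k,
         (fun (a : Int) k => a + (if (PySem.Str.isIn k c100) then (l.count k : Int) else 0)) t.2 k)),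
    PySem.List.foldl_prod_mk
      (f := fun (a : Int) k => a + (if (PySem.Str.isIn k c100 || PySem.Str.isIn k c255) then (l.count k : Int) else 0))
      (g := fun (a : Int) k => a + (if (PySem.Str.isIn k c100) then (l.count k : Int) else 0)),
    PySem.List.foldl_add, PySem.List.foldl_add, PySem.List.foldl_add,
    pv_sum_ofList_count, pv_sum_ofList_count, pv_sum_ofList_count]
  simp

-- ===== VERDICT (by name: the statement is the Claim_ definition above) =====
theorem append_chargrams_spec : Claim_equal_append_chargrams := by
  intro features headline_no_stops clean_body clean_body_100 clean_body_255 size _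
  unfold Spec_append_chargrams append_chargrams append_chargrams_alt chargramsPort
  have hgrams : ((PySem.List.pyRange 0 ((headline_no_stops.length : Int) - size + 1) 1).foldl
      (fun output i => output ++ [PySem.List.slice headline_no_stops (some i) (some (i + size))]) []).map
        (fun x => PySem.Str.join " " x)
      = (PySem.List.pyRange 0 ((headline_no_stops.length : Int) - size + 1) 1).map
        (fun i => PySem.Str.join " " (PySem.List.slice headline_no_stops (some i) (some (i + size)))) := by
    rw [PySem.List.foldl_append_singleton_eq_map, List.nil_append, List.map_map]
    rfl
  have hdict : (PySem.List.pyRange 0 ((headline_no_stops.length : Int) - size + 1) 1).foldl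
      (fun (d : PySem.Dict String Int) i =>
        let g := PySem.Str.join " " (PySem.List.slice headline_no_stops (some i) (some (i + size)))
        d.insert g (d.getD g 0 + 1)) PySem.Dict.empty
      = PySem.Dict.counter ((PySem.List.pyRange 0 ((headline_no_stops.length : Int) - size + 1) 1).map
        (fun i => PySem.Str.join " " (PySem.List.slice headline_no_stops (some i) (some (i + size))))) := by
    rw [← PySem.Dict.foldl_insert_getD_add_one_eq_counter, List.foldl_map]
  simp only [hgrams, hdict, pv_foldA, pv_foldB]
  simp
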